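-- pv_equiv track=rewrite | github.com/IamJohnRain/PowerCapslock | test/capslock_a_self_test.py | extract_run_log
-- ===== SOURCE A (Python) =====
-- def extract_run_log(log_text: str, run_id: int) -> list[str]:
--     needle = f"run_id={run_id}"
--     lines = [line for line in log_text.splitlines() if needle in line]
--
--     if lines:
--         return lines
--
--     fallback_keywords = (
--         "[CapsLock+A",
--         "CapsLock+A",
--         "async_start",
--         "async_stop",
--     )
--     return [line for line in log_text.splitlines() if any(keyword in line for keyword in fallback_keywords)]
-- ===== SOURCE B (Python) =====
-- def extract_run_log(log_text: str, run_id: int) -> list[str]: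
--     needle = f"run_id={run_id}"
--     primary: list[str] = []
--     fallback: list[str] = []
--     for line in log_text.splitlines():
--         if needle in line:
--             primary.append(line)
--         # "CapsLock+A" subsumes "[CapsLock+A", so one check suffices
--         if "CapsLock+A" in line or "async_start" in line or "async_stop" in line:
--             fallback.append(line)
--     return primary if primary else fallback
-- ===== Notes on version B (the rewrite author's own statement) =====
-- stated objective: alternative
-- what changed: Single splitlines pass maintaining primary and fallback accumulators simultaneously (and dropping the redundant '[CapsLock+A' keyword), instead of A's two separate comprehension passes each re-splitting the text.
import Mathlib
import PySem

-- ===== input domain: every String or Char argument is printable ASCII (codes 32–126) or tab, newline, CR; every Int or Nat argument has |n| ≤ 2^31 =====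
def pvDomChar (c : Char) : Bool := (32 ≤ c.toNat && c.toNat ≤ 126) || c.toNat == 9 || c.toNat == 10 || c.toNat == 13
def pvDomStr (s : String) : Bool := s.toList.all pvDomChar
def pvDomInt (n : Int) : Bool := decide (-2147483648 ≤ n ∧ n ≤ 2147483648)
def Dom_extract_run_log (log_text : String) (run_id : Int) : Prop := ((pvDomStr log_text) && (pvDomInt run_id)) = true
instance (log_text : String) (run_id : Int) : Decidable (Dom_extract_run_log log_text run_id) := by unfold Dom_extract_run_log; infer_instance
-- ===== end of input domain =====

-- B merges A's two filtering passes into one traversal keeping two accumulators; return values are proved equal, no side effects involved.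

-- ===== PORT A =====
def extract_run_log (log_text : String) (run_id : Int) : List String :=
  let needle : List Char := "run_id=".toList ++ PySem.Int.toChars run_id
  let lines := (PySem.Str.splitlines log_text).filter
    (fun line => PySem.Chars.isIn needle line.toList)
  if lines ≠ [] then lines
  else (PySem.Str.splitlines log_text).filter (fun line =>
    PySem.Chars.isIn "[CapsLock+A".toList line.toList ||
    PySem.Chars.isIn "CapsLock+A".toList line.toList ||
    PySem.Chars.isIn "async_start".toList line.toList ||
    PySem.Chars.isIn "async_stop".toList line.toList)

-- ===== PORT B =====
def extract_run_log_alt (log_text : String) (run_id : Int) : List String :=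
  let needle : List Char := "run_id=".toList ++ PySem.Int.toChars run_id
  let acc := (PySem.Str.splitlines log_text).foldl
    (fun (acc : List String × List String) line =>
      (if PySem.Chars.isIn needle line.toList then acc.1 ++ [line] else acc.1,
       if PySem.Chars.isIn "CapsLock+A".toList line.toList ||
          PySem.Chars.isIn "async_start".toList line.toList ||
          PySem.Chars.isIn "async_stop".toList line.toList
        then acc.2 ++ [line] else acc.2))
    ([], [])
  if acc.1 ≠ [] then acc.1 else acc.2

-- ===== PRECONDITION & SPEC =====
def Spec_extract_run_log (log_text : String) (run_id : Int) (out : List String) : Prop := out = extract_run_log_alt log_text run_id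
instance (log_text : String) (run_id : Int) (out : List String) : Decidable (Spec_extract_run_log log_text run_id out) := by unfold Spec_extract_run_log; infer_instance

-- ===== CLAIM (what is proved, stated in full; the proofs are below) =====
def Claim_equal_extract_run_log : Prop := ∀ (log_text : String) (run_id : Int), Dom_extract_run_log log_text run_id → Spec_extract_run_log log_text run_id (extract_run_log log_text run_id)

-- ===== LEMMAS AND PROOFS =====

-- The pair-accumulator fold computes the two filters at once.
lemma pairfold (p q : String → Bool) (xs : List String) (i1 i2 : List String) :
    xs.foldl (fun (acc : List String × List String) line =>
      (if p line then acc.1 ++ [line] else acc.1,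
       if q line then acc.2 ++ [line] else acc.2)) (i1, i2)
    = (i1 ++ xs.filter p, i2 ++ xs.filter q) := by
  induction xs generalizing i1 i2 with
  | nil => simp
  | cons x xs ih =>
    simp only [List.foldl_cons, ih, List.filter_cons]
    by_cases hp : p x <;> by_cases hq : q x <;> simp [hp, hq]

-- "[CapsLock+A" occurring in a line implies "CapsLock+A" does, so the first keyword is redundant.
lemma kw_redundant (l : List Char) :
    (PySem.Chars.isIn "[CapsLock+A".toList l ||
     PySem.Chars.isIn "CapsLock+A".toList l ||
     PySem.Chars.isIn "async_start".toList l ||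
     PySem.Chars.isIn "async_stop".toList l)
    = (PySem.Chars.isIn "CapsLock+A".toList l ||
       PySem.Chars.isIn "async_start".toList l ||
       PySem.Chars.isIn "async_stop".toList l) := by
  by_cases h : PySem.Chars.isIn "[CapsLock+A".toList l = true
  · have h2 : PySem.Chars.isIn "CapsLock+A".toList l = true := by
      rw [PySem.Chars.isIn_iff_infix] at h ⊢
      exact List.IsInfix.trans (by decide) h
    rw [h, h2]; rfl
  · rw [Bool.eq_false_iff.mpr h]; rfl

-- ===== VERDICT (by name: the statement is the Claim_ definition above) =====
theorem extract_run_log_spec : Claim_equal_extract_run_log := by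
  intro log_text run_id _
  unfold Spec_extract_run_log extract_run_log extract_run_log_alt
  simp only [pairfold, List.nil_append]
  have hf : List.filter (fun line =>
      PySem.Chars.isIn "[CapsLock+A".toList line.toList ||
      PySem.Chars.isIn "CapsLock+A".toList line.toList ||
      PySem.Chars.isIn "async_start".toList line.toList ||
      PySem.Chars.isIn "async_stop".toList line.toList) (PySem.Str.splitlines log_text)
      = List.filter (fun line =>
      PySem.Chars.isIn "CapsLock+A".toList line.toList ||
      PySem.Chars.isIn "async_start".toList line.toList ||
      PySem.Chars.isIn "async_stop".toList line.toList) (PySem.Str.splitlines log_text) :=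
    List.filter_congr (fun line _ => kw_redundant line.toList)
  rw [hf]
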